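-- pv_equiv track=rewrite | github.com/defarloa1-alt/graph1 | scripts/backbone/geographic/build_pleiades_geonames_crosswalk.py | _build_feature_code_distinct
-- ===== SOURCE A (Python) =====
-- from typing import Dict, List
--
-- def _build_feature_code_distinct(rows: List[dict]) -> List[dict]:
--     by_code: Dict[str, dict] = {}
--     for r in rows:
--         code = (r.get("geonames_feature_code") or "").strip()
--         if not code:
--             continue
--         d = by_code.setdefault(
--             code,
--             {
--                 "geonames_feature_code": code,
--                 "geonames_feature_code_label": (r.get("geonames_feature_code_label") or "").strip(),
--                 "row_count": 0,
--                 "distinct_geonames_ids": set(),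
--                 "distinct_pleiades_ids": set(),
--             },
--         )
--         d["row_count"] += 1
--         if r.get("geonames_id"):
--             d["distinct_geonames_ids"].add(r["geonames_id"])
--         if r.get("pleiades_id"):
--             d["distinct_pleiades_ids"].add(r["pleiades_id"])
--
--     out: List[dict] = []
--     for d in by_code.values():
--         out.append(
--             {
--                 "geonames_feature_code": d["geonames_feature_code"],
--                 "geonames_feature_code_label": d["geonames_feature_code_label"],
--                 "row_count": str(d["row_count"]),
--                 "distinct_geonames_ids": str(len(d["distinct_geonames_ids"])),
--                 "distinct_pleiades_ids": str(len(d["distinct_pleiades_ids"])),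
--             }
--         )
--     out.sort(key=lambda r: (-int(r["row_count"]), r["geonames_feature_code"]))
--     return out
-- ===== SOURCE B (Python) =====
-- from typing import List
--
-- def _build_feature_code_distinct(rows: List[dict]) -> List[dict]:
--     def code_of(r):
--         return (r.get("geonames_feature_code") or "").strip()
--
--     codes: List[str] = []
--     for r in rows:
--         c = code_of(r)
--         if c and c not in codes:
--             codes.append(c)
--
--     out: List[dict] = []
--     for c in codes:
--         grp = [r for r in rows if code_of(r) == c]
--         out.append(
--             {
--                 "geonames_feature_code": c,
--                 "geonames_feature_code_label": (grp[0].get("geonames_feature_code_label") or "").strip(),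
--                 "row_count": str(len(grp)),
--                 "distinct_geonames_ids": str(len({r["geonames_id"] for r in grp if r.get("geonames_id")})),
--                 "distinct_pleiades_ids": str(len({r["pleiades_id"] for r in grp if r.get("pleiades_id")})),
--             }
--         )
--     out.sort(key=lambda r: (-int(r["row_count"]), r["geonames_feature_code"]))
--     return out
-- ===== Notes on version B (the rewrite author's own statement) =====
-- stated objective: alternative
-- what changed: A makes one pass maintaining a dict of mutable per-code aggregate records; B first collects the distinct non-empty stripped feature codes in first-seen order, then computes each group's label/count/distinct-id counts by an independent filtered scan of the full row list, and applies the same final sort.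
import Mathlib
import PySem

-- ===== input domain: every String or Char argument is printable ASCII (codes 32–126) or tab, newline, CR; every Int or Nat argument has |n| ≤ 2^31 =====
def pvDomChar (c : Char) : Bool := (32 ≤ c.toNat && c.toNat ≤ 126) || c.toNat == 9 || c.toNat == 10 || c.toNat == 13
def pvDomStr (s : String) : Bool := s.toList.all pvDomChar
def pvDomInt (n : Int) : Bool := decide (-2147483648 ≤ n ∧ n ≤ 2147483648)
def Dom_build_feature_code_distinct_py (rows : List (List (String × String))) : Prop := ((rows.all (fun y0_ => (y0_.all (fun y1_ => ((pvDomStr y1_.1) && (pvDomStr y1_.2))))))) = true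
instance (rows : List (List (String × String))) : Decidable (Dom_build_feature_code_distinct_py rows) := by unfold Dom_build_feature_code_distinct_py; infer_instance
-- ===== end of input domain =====

-- B replaces A's one-pass dict of mutable aggregates by a first-seen dedup of codes plus
-- an independent filtered scan of the rows per code (objective: alternative decomposition, same results).

-- shared: Python's (r.get(k) or "") on a string-valued dict (missing key or "" both give "")
def pvGetS (r : List (String × String)) (k : String) : String :=
  ((PySem.Dict.mk r).get? k).getD ""

-- shared: (r.get("geonames_feature_code") or "").strip()
def pvCode (r : List (String × String)) : String :=
  PySem.Str.strip (pvGetS r "geonames_feature_code")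

-- shared: the final sort keys (identical lambda in both Pythons).
-- int(r["row_count"]) always parses on the rows both programs build (it is str(count)), so .getD 0 is exact there.
def pvKey1 (r : List (String × String)) : Int := -((PySem.Int.ofStr? (pvGetS r "row_count")).getD 0)
def pvKey2 (r : List (String × String)) : String := pvGetS r "geonames_feature_code"

-- ===== PORT A =====
-- aggregate record: (code, label, row_count, distinct_geonames_ids, distinct_pleiades_ids)
def pvStepA (d : PySem.Dict String (String × String × Int × PySem.Set String × PySem.Set String))
    (r : List (String × String)) :
    PySem.Dict String (String × String × Int × PySem.Set String × PySem.Set String) :=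
  let code := pvCode r
  if code = "" then d
  else
    -- setdefault: read the existing record or the freshly inserted default, then mutate and store back
    let cur := (d.get? code).getD
      (code, PySem.Str.strip (pvGetS r "geonames_feature_code_label"), 0, PySem.Set.empty, PySem.Set.empty)
    let gid := pvGetS r "geonames_id"
    let pid := pvGetS r "pleiades_id"
    d.insert code
      (cur.1, cur.2.1, cur.2.2.1 + 1,
       if gid = "" then cur.2.2.2.1 else PySem.Set.add cur.2.2.2.1 gid,
       if pid = "" then cur.2.2.2.2 else PySem.Set.add cur.2.2.2.2 pid)

def pvRowOfA (v : String × String × Int × PySem.Set String × PySem.Set String) :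
    List (String × String) :=
  [("geonames_feature_code", v.1),
   ("geonames_feature_code_label", v.2.1),
   ("row_count", PySem.Int.toStr v.2.2.1),
   ("distinct_geonames_ids", PySem.Int.toStr (v.2.2.2.1.length : Int)),
   ("distinct_pleiades_ids", PySem.Int.toStr (v.2.2.2.2.length : Int))]

def build_feature_code_distinct_py (rows : List (List (String × String))) :
    List (List (String × String)) :=
  let by_code := rows.foldl pvStepA PySem.Dict.empty
  let out := by_code.values.foldl (fun acc v => acc ++ [pvRowOfA v]) []
  PySem.List.sorted2 out pvKey1 pvKey2

-- ===== PORT B =====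
def pvCodesB (rows : List (List (String × String))) : List String :=
  rows.foldl (fun acc r =>
    let c := pvCode r
    if c ≠ "" ∧ c ∉ acc then acc ++ [c] else acc) []

def pvRowOfB (rows : List (List (String × String))) (c : String) : List (String × String) :=
  let grp := rows.filter (fun r => pvCode r == c)
  [("geonames_feature_code", c),
   ("geonames_feature_code_label",
     match grp with
     | [] => ""   -- unreachable: every c ∈ pvCodesB rows has a matching row
     | r :: _ => PySem.Str.strip (pvGetS r "geonames_feature_code_label")),
   ("row_count", PySem.Int.toStr (grp.length : Int)),
   ("distinct_geonames_ids", PySem.Int.toStr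
     ((PySem.Set.ofList ((grp.filter (fun r => pvGetS r "geonames_id" != "")).map
        (fun r => pvGetS r "geonames_id"))).length : Int)),
   ("distinct_pleiades_ids", PySem.Int.toStr
     ((PySem.Set.ofList ((grp.filter (fun r => pvGetS r "pleiades_id" != "")).map
        (fun r => pvGetS r "pleiades_id"))).length : Int))]

def build_feature_code_distinct_py_alt (rows : List (List (String × String))) :
    List (List (String × String)) :=
  PySem.List.sorted2 ((pvCodesB rows).map (pvRowOfB rows)) pvKey1 pvKey2

-- ===== PRECONDITION & SPEC =====
def Spec_build_feature_code_distinct_py (rows : List (List (String × String))) (out : List (List (String × String))) : Prop := out = build_feature_code_distinct_py_alt rows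
instance (rows : List (List (String × String))) (out : List (List (String × String))) : Decidable (Spec_build_feature_code_distinct_py rows out) := by unfold Spec_build_feature_code_distinct_py; infer_instance

-- ===== CLAIM (what is proved, stated in full; the proofs are below) =====
def Claim_equal_build_feature_code_distinct_py : Prop := ∀ (rows : List (List (String × String))), Dom_build_feature_code_distinct_py rows → Spec_build_feature_code_distinct_py rows (build_feature_code_distinct_py rows)

-- ===== LEMMAS AND PROOFS =====

-- B's aggregate record for code c over the whole list (mirrors pvRowOfB componentwise)
def pvRecOf (rows : List (List (String × String))) (c : String) :
    String × String × Int × PySem.Set String × PySem.Set String :=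
  let grp := rows.filter (fun r => pvCode r == c)
  (c,
   (match grp with
    | [] => ""
    | r :: _ => PySem.Str.strip (pvGetS r "geonames_feature_code_label")),
   (grp.length : Int),
   PySem.Set.ofList ((grp.filter (fun r => pvGetS r "geonames_id" != "")).map
     (fun r => pvGetS r "geonames_id")),
   PySem.Set.ofList ((grp.filter (fun r => pvGetS r "pleiades_id" != "")).map
     (fun r => pvGetS r "pleiades_id")))

lemma pvRowOfB_eq (rows : List (List (String × String))) (c : String) :
    pvRowOfB rows c = pvRowOfA (pvRecOf rows c) := rfl

lemma pvCodesB_mem_aux (l : List (List (String × String))) (acc : List String) (c : String) :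
    c ∈ l.foldl (fun acc r =>
      let x := pvCode r
      if x ≠ "" ∧ x ∉ acc then acc ++ [x] else acc) acc
    ↔ c ∈ acc ∨ (c ≠ "" ∧ ∃ r ∈ l, pvCode r = c) := by
  induction l generalizing acc with
  | nil => simp
  | cons r t ih =>
    simp only [List.foldl_cons, ih, List.exists_mem_cons_iff]
    split_ifs with h
    · simp only [List.mem_append, List.mem_singleton]
      constructor
      · rintro ((hc | rfl) | ⟨hne, hex⟩)
        · exact .inl hc
        · exact .inr ⟨h.1, .inl rfl⟩
        · exact .inr ⟨hne, .inr hex⟩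
      · rintro (hc | ⟨hne, (hcr | hex)⟩)
        · exact .inl (.inl hc)
        · exact .inl (.inr hcr.symm)
        · exact .inr ⟨hne, hex⟩
    · rw [not_and_or, not_not] at h
      constructor
      · rintro (hc | ⟨hne, hex⟩)
        · exact .inl hc
        · exact .inr ⟨hne, .inr hex⟩
      · rintro (hc | ⟨hne, (hcr | hex)⟩)
        · exact .inl hc
        · rcases h with h1 | h1
          · exact absurd (hcr.symm.trans h1) hne
          · exact .inl (hcr ▸ not_not.mp h1)
        · exact .inr ⟨hne, hex⟩

lemma pvMem_codesB (rows : List (List (String × String))) (c : String) :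
    c ∈ pvCodesB rows ↔ c ≠ "" ∧ ∃ r ∈ rows, pvCode r = c := by
  simpa using pvCodesB_mem_aux rows [] c

lemma pvCodesB_nodup_aux (l : List (List (String × String))) (acc : List String)
    (h : acc.Nodup) :
    (l.foldl (fun acc r =>
      let x := pvCode r
      if x ≠ "" ∧ x ∉ acc then acc ++ [x] else acc) acc).Nodup := by
  induction l generalizing acc with
  | nil => simpa using h
  | cons r t ih =>
    simp only [List.foldl_cons]
    by_cases hc : pvCode r ≠ "" ∧ pvCode r ∉ acc
    · rw [if_pos hc]
      exact ih _ (by simp [List.nodup_append, h]; exact fun a ha hae => hc.2 (hae ▸ ha))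
    · rw [if_neg hc]; exact ih _ h

lemma pvCodesB_nodup (rows : List (List (String × String))) : (pvCodesB rows).Nodup :=
  pvCodesB_nodup_aux rows [] List.nodup_nil

lemma pvCodesB_append_singleton (rows : List (List (String × String))) (r : List (String × String)) :
    pvCodesB (rows ++ [r]) =
      if pvCode r ≠ "" ∧ pvCode r ∉ pvCodesB rows then pvCodesB rows ++ [pvCode r]
      else pvCodesB rows := by
  simp [pvCodesB, List.foldl_append]

lemma pvRecOf_append_of_ne (rows : List (List (String × String))) (r : List (String × String))
    (c : String) (h : pvCode r ≠ c) :
    pvRecOf (rows ++ [r]) c = pvRecOf rows c := by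
  simp [pvRecOf, List.filter_append, h]

lemma pvSet_ofList_append (l m : List String) :
    PySem.Set.ofList (l ++ m) = m.foldl PySem.Set.add (PySem.Set.ofList l) := by
  rw [PySem.Set.ofList_eq_foldl, PySem.Set.ofList_eq_foldl, List.foldl_append]

lemma pvSet_ofList_append_singleton (l : List String) (a : String) :
    PySem.Set.ofList (l ++ [a]) = PySem.Set.add (PySem.Set.ofList l) a := by
  rw [pvSet_ofList_append]; rfl

lemma pvIds_append (g : List (List (String × String))) (r : List (String × String)) (k : String) :
    PySem.Set.ofList (((g ++ [r]).filter (fun x => pvGetS x k != "")).map (fun x => pvGetS x k)) =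
      if pvGetS r k = "" then
        PySem.Set.ofList ((g.filter (fun x => pvGetS x k != "")).map (fun x => pvGetS x k))
      else
        PySem.Set.add
          (PySem.Set.ofList ((g.filter (fun x => pvGetS x k != "")).map (fun x => pvGetS x k)))
          (pvGetS r k) := by
  by_cases hg : pvGetS r k = "" <;>
    simp [List.filter_append, hg, pvSet_ofList_append_singleton]

-- the central invariant: the dict A builds is exactly B's codes list paired with B's aggregates
lemma pvItems_fold (rows : List (List (String × String))) :
    (rows.foldl pvStepA PySem.Dict.empty).items =
      (pvCodesB rows).map (fun c => (c, pvRecOf rows c)) := by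
  induction rows using List.reverseRecOn with
  | nil => rfl
  | append_singleton rows r ih =>
    rw [List.foldl_append, List.foldl_cons, List.foldl_nil, pvCodesB_append_singleton]
    set d := rows.foldl pvStepA PySem.Dict.empty with hd
    have hkeys : d.keys = pvCodesB rows := by
      show d.items.map Prod.fst = _
      rw [ih, List.map_map]; exact (List.map_congr_left fun c _ => rfl).trans (List.map_id _)
    have hnodup : d.keys.Nodup := by rw [hkeys]; exact pvCodesB_nodup rows
    by_cases he : pvCode r = ""
    · -- empty code: A skips the row, B's codes and aggregates are unchanged
      rw [if_neg (by simp [he])]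
      show (pvStepA d r).items = _
      rw [pvStepA, if_pos he, ih]
      refine List.map_congr_left (fun c hc => ?_)
      have hcne : c ≠ "" := ((pvMem_codesB rows c).mp hc).1
      rw [pvRecOf_append_of_ne rows r c (by rw [he]; exact fun h => hcne h.symm)]
    · by_cases hm : pvCode r ∈ pvCodesB rows
      · -- seen code: insert overwrites in place; only the c-th record changes
        rw [if_neg (by simp [hm])]
        have hgrpne : rows.filter (fun x => pvCode x == pvCode r) ≠ [] := by
          obtain ⟨-, x, hx, hcx⟩ := (pvMem_codesB rows _).mp hm
          intro hnil
          have := List.filter_eq_nil_iff.mp hnil x hx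
          simp [hcx] at this
        have hget : d.get? (pvCode r) = some (pvRecOf rows (pvCode r)) := by
          rw [PySem.Dict.get?_eq_some_iff_mem_items _ _ _ hnodup, ih]
          exact List.mem_map.mpr ⟨pvCode r, hm, rfl⟩
        have hcont : d.contains (pvCode r) = true := by
          rw [PySem.Dict.contains_iff_mem_keys, hkeys]; exact hm
        show (pvStepA d r).items = _
        rw [pvStepA, if_neg he, hget]
        simp only [Option.getD_some]
        rw [PySem.Dict.items_insert_of_contains _ _ hcont, ih, List.map_map]
        refine List.map_congr_left (fun c hc => ?_)
        by_cases hcr : c = pvCode r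
        · subst hcr
          simp only [Function.comp_apply, beq_self_eq_true, if_pos]
          obtain ⟨x, t, hxt⟩ := List.exists_cons_of_ne_nil hgrpne
          have hgrp : (rows ++ [r]).filter (fun x => pvCode x == pvCode r)
              = (x :: t) ++ [r] := by simp [List.filter_append, hxt]
          simp only [pvRecOf, hgrp, hxt, pvIds_append]
          by_cases hg : pvGetS r "geonames_id" = "" <;>
            by_cases hp : pvGetS r "pleiades_id" = "" <;>
            simp [hg, hp, List.cons_append, List.length_append]
        · have : (c == pvCode r) = false := beq_false_of_ne hcr
          simp only [Function.comp_apply, this, Bool.false_eq_true, if_false]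
          rw [pvRecOf_append_of_ne rows r c (fun h => hcr h.symm)]
      · -- fresh code: insert appends; its aggregate comes from row r alone
        rw [if_pos ⟨he, hm⟩]
        have hget : d.get? (pvCode r) = none := by
          rw [PySem.Dict.get?_eq_none_iff_not_mem_keys, hkeys]; exact hm
        have hcont : d.contains (pvCode r) = false := by
          rw [PySem.Dict.contains_eq_isSome_get?, hget]; rfl
        have hgrpnil : rows.filter (fun x => pvCode x == pvCode r) = [] := by
          refine List.filter_eq_nil_iff.mpr (fun x hx => ?_)
          intro hbeq
          exact hm ((pvMem_codesB rows _).mpr ⟨he, x, hx, eq_of_beq hbeq⟩)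
        show (pvStepA d r).items = _
        rw [pvStepA, if_neg he, hget]
        simp only [Option.getD_none]
        rw [PySem.Dict.items_insert_of_not_contains _ _ hcont, ih, List.map_append]
        congr 1
        · refine List.map_congr_left (fun c hc => ?_)
          have hcr : pvCode r ≠ c := fun h => hm (h ▸ hc)
          rw [pvRecOf_append_of_ne rows r c hcr]
        · simp only [List.map_cons, List.map_nil, List.cons.injEq, and_true]
          refine congrArg _ ?_
          simp only [pvRecOf, List.filter_append, hgrpnil, List.nil_append,
            List.filter_cons, beq_self_eq_true, if_pos, List.filter_nil]
          refine Prod.ext rfl (Prod.ext rfl (Prod.ext rfl (Prod.ext ?_ ?_))) <;>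
            by_cases hg : pvGetS r "geonames_id" = "" <;>
            by_cases hp : pvGetS r "pleiades_id" = "" <;>
              simp [hg, hp, PySem.Set.ofList, PySem.Set.add, PySem.Set.empty,
                PySem.Set.contains]

-- ===== VERDICT (by name: the statement is the Claim_ definition above) =====
theorem build_feature_code_distinct_py_spec : Claim_equal_build_feature_code_distinct_py := by
  intro rows _
  show build_feature_code_distinct_py rows = build_feature_code_distinct_py_alt rows
  rw [build_feature_code_distinct_py, build_feature_code_distinct_py_alt]
  simp only [PySem.List.foldl_append_singleton_eq_map, List.nil_append]
  congr 1
  show ((rows.foldl pvStepA PySem.Dict.empty).items.map Prod.snd).map pvRowOfA = _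
  rw [pvItems_fold, List.map_map, List.map_map]
  exact List.map_congr_left (fun c _ => (pvRowOfB_eq rows c).symm)
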